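-- pv_equiv track=rewrite | github.com/westkite2/AlgorithmStudy | Brute force/프로그래머스_소수만들기.py | solution
-- ===== SOURCE A (Python) =====
-- def isPrime(num):
--     i = 2
--     while i * i <= num:
--         if num % i == 0:
--             return False
--         i += 1
--     return True
--
-- def solution(nums):
--     answer = 0
--     sum = 0
--     numslen = len(nums)
--     for i in range(0, numslen-2):
--         for j in range(i+1, numslen-1):
--             for k in range(j+1, numslen):
--                 if(isPrime(nums[i]+nums[j]+nums[k])):
--                     answer += 1
--
--     return answer
-- ===== SOURCE B (Python) =====
-- def isPrime(num):
--     i = 2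
--     while i * i <= num:
--         if num % i == 0:
--             return False
--         i += 1
--     return True
--
-- def solution(nums):
--     # One right-to-left pass maintaining all suffix 1- and 2-subset sums;
--     # each element closes the triples in which it is the leftmost member.
--     singles = []
--     pairs = []
--     count = 0
--     for x in reversed(nums):
--         count += sum(1 for p in pairs if isPrime(x + p))
--         pairs = [x + s for s in singles] + pairs
--         singles = [x] + singles
--     return count
-- ===== Notes on version B (the rewrite author's own statement) =====
-- stated objective: alternative
-- what changed: Replaces A's three nested index loops over range() by a single right-to-left pass that maintains the lists of suffix 1-element and 2-element subset sums, counting for each element the prime triples it starts.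
import Mathlib
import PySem

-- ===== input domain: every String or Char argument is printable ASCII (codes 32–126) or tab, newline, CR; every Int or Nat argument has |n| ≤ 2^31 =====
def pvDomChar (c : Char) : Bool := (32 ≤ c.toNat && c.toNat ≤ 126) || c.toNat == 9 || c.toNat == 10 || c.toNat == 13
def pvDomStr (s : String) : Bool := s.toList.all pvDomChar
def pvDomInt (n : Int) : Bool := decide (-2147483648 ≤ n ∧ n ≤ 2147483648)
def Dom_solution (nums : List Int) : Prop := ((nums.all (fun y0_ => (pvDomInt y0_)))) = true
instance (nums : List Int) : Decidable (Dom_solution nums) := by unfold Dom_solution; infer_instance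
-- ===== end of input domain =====

-- B replaces A's three nested index loops by one right-to-left pass that maintains
-- suffix 1- and 2-subset sums (objective: alternative decomposition, same cost).

-- ===== PORT A =====
-- shared helper isPrime (identical in Source A and Source B)
def isPrimeAux (num : Int) (i : Nat) : Bool :=
  if h : (i : Int) * i ≤ num then
    if PySem.Int.mod num i == 0 then false
    else isPrimeAux num (i + 1)
  else true
termination_by num.toNat + 1 - i
decreasing_by
  rcases Nat.eq_zero_or_pos i with h0 | h0
  · subst h0; simp at h; omega
  · have h1 : (i : Int) ≤ (i : Int) * i := by nlinarith [Int.natCast_pos.mpr h0]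
    omega

def isP (num : Int) : Bool := isPrimeAux num 2

def solution (nums : List Int) : Int :=
  let numslen : Int := nums.length
  (PySem.List.pyRange 0 (numslen - 2) 1).foldl (fun answer i =>
    (PySem.List.pyRange (i + 1) (numslen - 1) 1).foldl (fun answer j =>
      (PySem.List.pyRange (j + 1) numslen 1).foldl (fun answer k =>
        if isP (PySem.List.pyGetD nums i 0 + PySem.List.pyGetD nums j 0
                + PySem.List.pyGetD nums k 0)
        then answer + 1 else answer) answer) answer) 0

-- ===== PORT B =====
def solution_alt (nums : List Int) : Int :=
  (nums.foldr (fun x st =>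
      match st with
      | (singles, pairs, count) =>
        (x :: singles,
         singles.map (fun s => x + s) ++ pairs,
         count + ((pairs.countP (fun p => isP (x + p)) : Nat) : Int)))
    (([], [], 0) : List Int × List Int × Int)).2.2

-- ===== PRECONDITION & SPEC =====
def Spec_solution (nums : List Int) (out : Int) : Prop := out = solution_alt nums
instance (nums : List Int) (out : Int) : Decidable (Spec_solution nums out) := by unfold Spec_solution; infer_instance

-- ===== CLAIM (what is proved, stated in full; the proofs are below) =====
def Claim_equal_solution : Prop := ∀ (nums : List Int), Dom_solution nums → Spec_solution nums (solution nums)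

-- ===== LEMMAS AND PROOFS =====

-- ghost descriptions of the suffix pair/triple sums
def pairSums : List Int → List Int
  | [] => []
  | x :: r => r.map (fun y => x + y) ++ pairSums r

def tripleSums : List Int → List Int
  | [] => []
  | x :: r => (pairSums r).map (fun s => x + s) ++ tripleSums r

-- B's fold invariant
lemma foldrB (l : List Int) :
    l.foldr (fun x st =>
      match st with
      | (singles, pairs, count) =>
        (x :: singles,
         singles.map (fun s => x + s) ++ pairs,
         count + ((pairs.countP (fun p => isP (x + p)) : Nat) : Int)))
      (([], [], 0) : List Int × List Int × Int)
    = (l, pairSums l, (((tripleSums l).countP isP : Nat) : Int)) := by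
  induction l with
  | nil => simp [pairSums, tripleSums]
  | cons x r ih =>
      simp only [List.foldr_cons, ih, pairSums, tripleSums, List.countP_append,
        List.countP_map, Function.comp_def, Prod.mk.injEq]
      refine ⟨trivial, trivial, ?_⟩
      push_cast
      ring

lemma solution_alt_eq (l : List Int) :
    solution_alt l = ((tripleSums l).countP isP : Nat) := by
  simp [solution_alt, foldrB]

-- index-shift for a mapped range
lemma pyRange_succ_map {α : Type} (g : Int → α) (a b : Int) :
    (PySem.List.pyRange (a + 1) (b + 1) 1).map g
      = (PySem.List.pyRange a b 1).map (fun t => g (t + 1)) := by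
  rw [PySem.List.pyRange_one, PySem.List.pyRange_one]
  simp only [List.map_map]
  have : b + 1 - (a + 1) = b - a := by ring
  rw [this]
  apply List.map_congr_left
  intro k _
  simp [Function.comp]
  ring_nf

lemma pyGetD_cons_succ (x : Int) (r : List Int) (i d : Int) (h : 0 ≤ i) :
    PySem.List.pyGetD (x :: r) (i + 1) d = PySem.List.pyGetD r i d := by
  obtain ⟨n, rfl⟩ := Int.eq_ofNat_of_zero_le h
  have : ((n : Int) + 1) = ((n + 1 : Nat) : Int) := by push_cast; ring
  rw [this, PySem.List.pyGetD_natCast, PySem.List.pyGetD_natCast]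
  simp

-- middle layer: sum over j of prime-counts on the suffix equals a count over pairSums
lemma middle_sum (r : List Int) (s : Int) :
    ((PySem.List.pyRange 0 ((r.length : Int) - 1) 1).map (fun j =>
      (((r.drop (j + 1).toNat).countP
          (fun z => isP (s + PySem.List.pyGetD r j 0 + z)) : Nat) : Int))).sum
    = (((pairSums r).countP (fun t => isP (s + t)) : Nat) : Int) := by
  induction r with
  | nil => simp [pairSums, PySem.List.pyRange_one_eq_nil]
  | cons y t ih =>
      rcases t with _ | ⟨z, t'⟩
      · simp [pairSums, PySem.List.pyRange_one_eq_nil]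
      · set t := z :: t' with ht
        have hlen : ((y :: t).length : Int) - 1 = (t.length : Int) := by
          simp
        have hpos : (0 : Int) < (t.length : Int) := by simp [ht]
        rw [hlen, PySem.List.pyRange_one_cons hpos]
        rw [List.map_cons, List.sum_cons]
        have hshift : (PySem.List.pyRange (0 + 1) ((t.length : Int)) 1)
            = PySem.List.pyRange (0 + 1) (((t.length : Int) - 1) + 1) 1 := by
          congr 1; ring
        rw [hshift, pyRange_succ_map]
        have hmap : (PySem.List.pyRange 0 ((t.length : Int) - 1) 1).map
              (fun j => ((((y :: t).drop ((j + 1) + 1).toNat).countP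
                (fun z => isP (s + PySem.List.pyGetD (y :: t) (j + 1) 0 + z)) : Nat) : Int))
            = (PySem.List.pyRange 0 ((t.length : Int) - 1) 1).map (fun j =>
              (((t.drop (j + 1).toNat).countP
                (fun z => isP (s + PySem.List.pyGetD t j 0 + z)) : Nat) : Int)) := by
          apply List.map_congr_left
          intro j hj
          have hj0 : 0 ≤ j := (PySem.List.mem_pyRange_one.mp hj).1
          rw [pyGetD_cons_succ _ _ _ _ hj0]
          have : ((j + 1) + 1).toNat = (j + 1).toNat + 1 := by omega
          rw [this]
          simp
        rw [hmap, ih]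
        have hhead : PySem.List.pyGetD (y :: t) 0 0 = y := by
          simp [PySem.List.pyGetD_zero_cons]
        rw [hhead]
        have h1 : ((y :: t).drop ((0 : Int) + 1).toNat) = t := by norm_num
        rw [h1]
        simp only [pairSums, List.countP_append, List.countP_map, Function.comp_def,
          add_assoc]
        push_cast
        ring

-- outer layer: the double sum equals a count over tripleSums
lemma outer_sum (l : List Int) :
    ((PySem.List.pyRange 0 ((l.length : Int) - 2) 1).map (fun i =>
      ((PySem.List.pyRange (i + 1) ((l.length : Int) - 1) 1).map (fun j =>
        (((l.drop (j + 1).toNat).countP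
            (fun z => isP (PySem.List.pyGetD l i 0 + PySem.List.pyGetD l j 0 + z)) : Nat) : Int))).sum)).sum
    = (((tripleSums l).countP isP : Nat) : Int) := by
  induction l with
  | nil => simp [tripleSums, PySem.List.pyRange_one_eq_nil]
  | cons x r ih =>
      rcases r with _ | ⟨y, r'⟩
      · simp [tripleSums, pairSums, PySem.List.pyRange_one_eq_nil]
      · rcases r' with _ | ⟨z, r''⟩
        · simp [tripleSums, pairSums, PySem.List.pyRange_one_eq_nil]
        · set r := y :: z :: r'' with hr
          have hlen2 : ((x :: r).length : Int) - 2 = (r.length : Int) - 1 := by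
            simp; ring
          have hlen1 : ((x :: r).length : Int) - 1 = (r.length : Int) := by
            simp
          have hpos : (0 : Int) < (r.length : Int) - 1 := by simp [hr]
          rw [hlen2, PySem.List.pyRange_one_cons hpos]
          rw [List.map_cons, List.sum_cons]
          -- first term: i = 0
          have hhead : PySem.List.pyGetD (x :: r) 0 0 = x := by
            simp [PySem.List.pyGetD_zero_cons]
          have hfirst : ((PySem.List.pyRange (0 + 1) (((x :: r).length : Int) - 1) 1).map (fun j =>
                ((((x :: r).drop (j + 1).toNat).countP
                  (fun z => isP (PySem.List.pyGetD (x :: r) 0 0 + PySem.List.pyGetD (x :: r) j 0 + z)) : Nat) : Int))).sum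
              = (((pairSums r).countP (fun t => isP (x + t)) : Nat) : Int) := by
            rw [hlen1]
            have hsh : (PySem.List.pyRange (0 + 1) ((r.length : Int)) 1)
                = PySem.List.pyRange (0 + 1) (((r.length : Int) - 1) + 1) 1 := by
              congr 1; ring
            rw [hsh, pyRange_succ_map]
            have hmap : (PySem.List.pyRange 0 ((r.length : Int) - 1) 1).map
                  (fun j => ((((x :: r).drop ((j + 1) + 1).toNat).countP
                    (fun z => isP (PySem.List.pyGetD (x :: r) 0 0 + PySem.List.pyGetD (x :: r) (j + 1) 0 + z)) : Nat) : Int))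
                = (PySem.List.pyRange 0 ((r.length : Int) - 1) 1).map (fun j =>
                  (((r.drop (j + 1).toNat).countP
                    (fun z => isP (x + PySem.List.pyGetD r j 0 + z)) : Nat) : Int)) := by
              apply List.map_congr_left
              intro j hj
              have hj0 : 0 ≤ j := (PySem.List.mem_pyRange_one.mp hj).1
              rw [pyGetD_cons_succ _ _ _ _ hj0, hhead]
              have : ((j + 1) + 1).toNat = (j + 1).toNat + 1 := by omega
              rw [this]
              simp
            rw [hmap, middle_sum]
          rw [hfirst]
          -- remaining terms: shift i by one
          have hrest : ((PySem.List.pyRange (0 + 1) ((r.length : Int) - 1) 1).map (fun i =>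
                ((PySem.List.pyRange (i + 1) (((x :: r).length : Int) - 1) 1).map (fun j =>
                  ((((x :: r).drop (j + 1).toNat).countP
                    (fun z => isP (PySem.List.pyGetD (x :: r) i 0 + PySem.List.pyGetD (x :: r) j 0 + z)) : Nat) : Int))).sum)).sum
              = (((tripleSums r).countP isP : Nat) : Int) := by
            have hsh : (PySem.List.pyRange (0 + 1) ((r.length : Int) - 1) 1)
                = PySem.List.pyRange (0 + 1) (((r.length : Int) - 2) + 1) 1 := by
              congr 1; ring
            rw [hsh, pyRange_succ_map]
            have hmap : (PySem.List.pyRange 0 ((r.length : Int) - 2) 1).map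
                  (fun i => ((PySem.List.pyRange ((i + 1) + 1) (((x :: r).length : Int) - 1) 1).map (fun j =>
                    ((((x :: r).drop (j + 1).toNat).countP
                      (fun z => isP (PySem.List.pyGetD (x :: r) (i + 1) 0 + PySem.List.pyGetD (x :: r) j 0 + z)) : Nat) : Int))).sum)
                = (PySem.List.pyRange 0 ((r.length : Int) - 2) 1).map (fun i =>
                  ((PySem.List.pyRange (i + 1) ((r.length : Int) - 1) 1).map (fun j =>
                    (((r.drop (j + 1).toNat).countP
                      (fun z => isP (PySem.List.pyGetD r i 0 + PySem.List.pyGetD r j 0 + z)) : Nat) : Int))).sum) := by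
              apply List.map_congr_left
              intro i hi
              have hi0 : 0 ≤ i := (PySem.List.mem_pyRange_one.mp hi).1
              rw [pyGetD_cons_succ _ _ _ _ hi0, hlen1]
              have hsh2 : (PySem.List.pyRange ((i + 1) + 1) ((r.length : Int)) 1)
                  = PySem.List.pyRange ((i + 1) + 1) (((r.length : Int) - 1) + 1) 1 := by
                congr 1; ring
              rw [hsh2, pyRange_succ_map]
              apply congrArg List.sum
              apply List.map_congr_left
              intro j hj
              have hj0 : 0 ≤ j := by
                have := (PySem.List.mem_pyRange_one.mp hj).1
                omega
              rw [pyGetD_cons_succ _ _ _ _ hj0]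
              have : ((j + 1) + 1).toNat = (j + 1).toNat + 1 := by omega
              rw [this]
              simp
            rw [hmap, ih]
          rw [hrest]
          simp only [tripleSums, List.countP_append, List.countP_map, Function.comp_def]
          push_cast
          ring

-- A in double-sum form
lemma solution_eq_sum (nums : List Int) :
    solution nums
      = ((PySem.List.pyRange 0 ((nums.length : Int) - 2) 1).map (fun i =>
          ((PySem.List.pyRange (i + 1) ((nums.length : Int) - 1) 1).map (fun j =>
            (((nums.drop (j + 1).toNat).countP
                (fun z => isP (PySem.List.pyGetD nums i 0 + PySem.List.pyGetD nums j 0 + z)) : Nat) : Int))).sum)).sum := by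
  unfold solution
  rw [PySem.List.foldl_congr_mem (g := fun answer i =>
        answer + ((PySem.List.pyRange (i + 1) ((nums.length : Int) - 1) 1).map (fun j =>
          (((nums.drop (j + 1).toNat).countP
              (fun z => isP (PySem.List.pyGetD nums i 0 + PySem.List.pyGetD nums j 0 + z)) : Nat) : Int))).sum)]
  · rw [PySem.List.foldl_add]
    simp
  · intro acc i hi
    have hi0 : 0 ≤ i := (PySem.List.mem_pyRange_one.mp hi).1
    rw [PySem.List.foldl_congr_mem (g := fun answer j =>
          answer + (((nums.drop (j + 1).toNat).countP
            (fun z => isP (PySem.List.pyGetD nums i 0 + PySem.List.pyGetD nums j 0 + z)) : Nat) : Int))]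
    · rw [PySem.List.foldl_add]
    · intro acc2 j hj
      have hj1 : 0 ≤ j + 1 := by
        have := (PySem.List.mem_pyRange_one.mp hj).1
        omega
      rw [PySem.List.foldl_pyRange_pyGetD' nums 0 (fun a z =>
            if isP (PySem.List.pyGetD nums i 0 + PySem.List.pyGetD nums j 0 + z)
            then a + 1 else a) acc2 hj1]
      rw [PySem.List.foldl_if_add_one]

-- ===== VERDICT (by name: the statement is the Claim_ definition above) =====
theorem solution_spec : Claim_equal_solution := by
  intro nums _
  unfold Spec_solution
  rw [solution_eq_sum, outer_sum, solution_alt_eq]
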